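-- pv_equiv track=rewrite | github.com/MuYuan88ya/kz | utils.py | _is_transient_error_text
-- ===== SOURCE A (Python) =====
-- def _is_transient_error_text(error_text: str) -> bool:
--     lowered = error_text.lower()
--     return any(
--         marker in lowered
--         for marker in [
--             "eof",
--             "unexpected_eof",
--             "ssl",
--             "timeout",
--             "timed out",
--             "clientversioncheck",
--             "temporarily unavailable",
--             "connection reset",
--             "connection aborted",
--         ]
--     )
-- ===== SOURCE B (Python) =====
-- _MARKERS = [
--     "eof",
--     "unexpected_eof",
--     "ssl",
--     "timeout",
--     "timed out",
--     "clientversioncheck",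
--     "temporarily unavailable",
--     "connection reset",
--     "connection aborted",
-- ]
--
--
-- def _is_transient_error_text(error_text: str) -> bool:
--     # Single left-to-right scan: at each position, test whether some marker
--     # matches (case-insensitively) starting there, instead of lowering the
--     # whole text and searching it once per marker.
--     n = len(error_text)
--     for i in range(n):
--         for m in _MARKERS:
--             if error_text[i:i + len(m)].lower() == m:
--                 return True
--     return False
-- ===== Notes on version B (the rewrite author's own statement) =====
-- stated objective: alternative
-- what changed: Replaced the per-marker substring search over a fully lowered copy with one left-to-right scan that, at each position, tests whether any marker is a case-insensitive prefix of the remainder.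
import Mathlib
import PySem

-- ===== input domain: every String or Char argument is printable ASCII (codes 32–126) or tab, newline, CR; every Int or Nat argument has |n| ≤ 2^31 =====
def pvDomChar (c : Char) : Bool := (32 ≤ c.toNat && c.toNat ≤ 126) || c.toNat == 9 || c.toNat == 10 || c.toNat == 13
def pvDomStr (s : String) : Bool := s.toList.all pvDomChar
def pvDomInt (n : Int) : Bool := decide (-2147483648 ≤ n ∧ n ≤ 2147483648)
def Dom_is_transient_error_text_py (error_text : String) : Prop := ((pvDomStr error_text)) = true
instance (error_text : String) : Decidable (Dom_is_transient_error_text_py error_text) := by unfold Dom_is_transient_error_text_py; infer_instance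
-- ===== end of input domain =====

-- B replaces A's per-marker search over a lowered copy by a single positional scan; alternative structure, same results.


-- ===== PORT A =====
def is_transient_error_text_py (error_text : String) : Bool :=
  let lowered := PySem.Str.lower error_text
  [ "eof", "unexpected_eof", "ssl", "timeout", "timed out", "clientversioncheck",
    "temporarily unavailable", "connection reset", "connection aborted"
  ].any (fun marker => PySem.Str.isIn marker lowered)

-- ===== PORT B =====
-- B's module-level marker list, as lists of characters
def pvMarkers : List (List Char) :=
  [ "eof".toList, "unexpected_eof".toList, "ssl".toList, "timeout".toList,
    "timed out".toList, "clientversioncheck".toList, "temporarily unavailable".toList,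
    "connection reset".toList, "connection aborted".toList ]

-- B's loop over positions i: here, structural recursion over suffixes of the text;
-- error_text[i:i+len(m)].lower() == m  becomes  lower (suffix.take m.length) == m
def pvScan : List Char → Bool
  | [] => false
  | c :: t =>
      pvMarkers.any (fun m => PySem.Chars.lower ((c :: t).take m.length) == m) || pvScan t

def is_transient_error_text_py_alt (error_text : String) : Bool :=
  pvScan error_text.toList

-- ===== PRECONDITION & SPEC =====
def Spec_is_transient_error_text_py (error_text : String) (out : Bool) : Prop := out = is_transient_error_text_py_alt error_text
instance (error_text : String) (out : Bool) : Decidable (Spec_is_transient_error_text_py error_text out) := by unfold Spec_is_transient_error_text_py; infer_instance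

-- ===== CLAIM (what is proved, stated in full; the proofs are below) =====
def Claim_equal_is_transient_error_text_py : Prop := ∀ (error_text : String), Dom_is_transient_error_text_py error_text → Spec_is_transient_error_text_py error_text (is_transient_error_text_py error_text)

-- ===== LEMMAS AND PROOFS =====

-- B's scan finds exactly the markers that occur as infixes of the lowered text
lemma pvScan_iff (cs : List Char) :
    pvScan cs = true ↔ ∃ m ∈ pvMarkers, m <:+: PySem.Chars.lower cs := by
  induction cs with
  | nil =>
      constructor
      · intro h; exact absurd h (by simp [pvScan])
      · rintro ⟨m, hm, hinf⟩
        have : m = [] := List.eq_nil_of_infix_nil hinf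
        subst this
        revert hm; decide
  | cons c t ih =>
      have hlow : PySem.Chars.lower (c :: t)
          = PySem.Chars.lowerChar c :: List.map PySem.Chars.lowerChar t := rfl
      constructor
      · intro h
        have h' : (∃ m ∈ pvMarkers,
              PySem.Chars.lower (List.take m.length (c :: t)) = m) ∨ pvScan t = true := by
          simpa [pvScan] using h
        rcases h' with ⟨m, hm, he'⟩ | h2
        · refine ⟨m, hm, List.infix_cons_iff.mpr (Or.inl ?_)⟩
          have hcomm : PySem.Chars.lower (List.take m.length (c :: t))
              = List.take m.length (PySem.Chars.lowerChar c :: List.map PySem.Chars.lowerChar t) := by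
            simp [PySem.Chars.lower, List.map_take]
          rw [List.prefix_iff_eq_take, ← hcomm, he']
        · rcases ih.mp h2 with ⟨m, hm, hinf⟩
          exact ⟨m, hm, List.infix_cons_iff.mpr (Or.inr (by simpa [hlow] using hinf))⟩
      · rintro ⟨m, hm, hinf⟩
        rw [hlow] at hinf
        rcases List.infix_cons_iff.mp hinf with hpre | hinf'
        · have he : PySem.Chars.lower (List.take m.length (c :: t)) = m := by
            have hcomm : PySem.Chars.lower (List.take m.length (c :: t))
                = List.take m.length (PySem.Chars.lowerChar c :: List.map PySem.Chars.lowerChar t) := by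
              simp [PySem.Chars.lower, List.map_take]
            rw [hcomm, ← List.prefix_iff_eq_take.mp hpre]
          simp only [pvScan, Bool.or_eq_true]
          exact Or.inl (List.any_eq_true.mpr ⟨m, hm, by simp [he]⟩)
        · have : pvScan t = true := ih.mpr ⟨m, hm, hinf'⟩
          simp [pvScan, this]

-- A's result in the same form
lemma pvA_iff (s : String) :
    is_transient_error_text_py s = true ↔
      ∃ m ∈ pvMarkers, m <:+: PySem.Chars.lower s.toList := by
  simp only [is_transient_error_text_py, List.any_eq_true, PySem.Str.isIn_iff_infix,
    PySem.Str.toList_lower]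
  constructor
  · rintro ⟨mk, hmk, hinf⟩
    refine ⟨mk.toList, ?_, hinf⟩
    fin_cases hmk <;> decide
  · rintro ⟨m, hm, hinf⟩
    fin_cases hm
    · exact ⟨"eof", by decide, hinf⟩
    · exact ⟨"unexpected_eof", by decide, hinf⟩
    · exact ⟨"ssl", by decide, hinf⟩
    · exact ⟨"timeout", by decide, hinf⟩
    · exact ⟨"timed out", by decide, hinf⟩
    · exact ⟨"clientversioncheck", by decide, hinf⟩
    · exact ⟨"temporarily unavailable", by decide, hinf⟩
    · exact ⟨"connection reset", by decide, hinf⟩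
    · exact ⟨"connection aborted", by decide, hinf⟩

-- ===== VERDICT (by name: the statement is the Claim_ definition above) =====
theorem is_transient_error_text_py_spec : Claim_equal_is_transient_error_text_py := by
  intro s _
  unfold Spec_is_transient_error_text_py
  rw [Bool.eq_iff_iff]
  rw [pvA_iff]
  exact (pvScan_iff s.toList).symm
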